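-- pv_equiv track=rewrite | github.com/Bioprotocols/labop | labop/utils/plate_coordinates.py | row2num
-- ===== SOURCE A (Python) =====
-- from string import ascii_letters
--
-- def row2num(col: str):
--     """
--     Get the index of the alpha column string.
--     - A -> 1
--     - Z -> 26
--     - AA -> 27
--     - AZ -> 52
--     - etc
--     """
--     num = 0
--     for c in col:
--         if c in ascii_letters:
--             num = num * 26 + (ord(c.upper()) - ord("A")) + 1
--         else:
--             raise Exception(f"Invalid character: {c}")
--     return num
-- ===== SOURCE B (Python) =====
-- from string import ascii_letters, ascii_uppercase
--
-- def row2num(col: str):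
--     """
--     Get the index of the alpha column string.
--     """
--     for c in col:
--         if c not in ascii_letters:
--             raise Exception(f"Invalid character: {c}")
--     digits = [ascii_uppercase.index(c.upper()) + 1 for c in col]
--     total = 0
--     weight = 1
--     for d in reversed(digits):
--         total += d * weight
--         weight *= 26
--     return total
-- ===== Notes on version B (the rewrite author's own statement) =====
-- stated objective: alternative
-- what changed: A's single validate-as-you-go Horner accumulator is replaced by three staged passes: a validation loop, a digit list built by table lookup in ascii_uppercase, and a least-significant-first weighted sum over the reversed digit list with a running power of 26.
import Mathlib
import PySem

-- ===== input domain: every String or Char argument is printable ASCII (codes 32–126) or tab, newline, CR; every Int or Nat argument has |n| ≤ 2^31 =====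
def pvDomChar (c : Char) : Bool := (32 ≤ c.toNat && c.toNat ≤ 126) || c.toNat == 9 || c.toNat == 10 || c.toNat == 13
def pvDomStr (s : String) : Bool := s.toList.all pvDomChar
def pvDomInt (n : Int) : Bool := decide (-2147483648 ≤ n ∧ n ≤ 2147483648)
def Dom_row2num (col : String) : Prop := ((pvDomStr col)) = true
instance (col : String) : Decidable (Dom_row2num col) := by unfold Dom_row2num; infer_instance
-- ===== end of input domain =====

-- B replaces A's single validate-as-you-go Horner accumulator with three staged passes:
-- validation, a digit list built by table lookup in ascii_uppercase, and a weighted sum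
-- over the reversed digits with a running power of 26 (alternative decomposition, same cost).

-- ===== PORT A =====
-- Horner loop: num = num*26 + (ord(c.upper()) - ord('A')) + 1; raise on non-letter
-- (the 'else 0' corresponds to A's raise and is unreachable under Pre_row2num).
def row2numGo : List Char → Int → Int
  | [], num => num
  | c :: rest, num =>
    if PySem.Chars.isalpha c then
      row2numGo rest (num * 26 + (((PySem.Chars.upperChar c).toNat : Int) - 65) + 1)
    else 0

def row2num (col : String) : Int := row2numGo col.toList 0

-- ===== PORT B =====
-- string.ascii_uppercase
def pvUpperAlphabet : List Char := "ABCDEFGHIJKLMNOPQRSTUVWXYZ".toList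

-- ascii_uppercase.index(c.upper()) + 1; Python .index raises ValueError when absent,
-- which cannot happen here since B only calls this after validating c as a letter
-- (the getD 0 default is unreachable under Pre_row2num).
def pvDigitOf (c : Char) : Int :=
  ((PySem.List.index? pvUpperAlphabet (PySem.Chars.upperChar c)).getD 0 : Int) + 1

-- 'total += d * weight; weight *= 26' over reversed(digits): state (total, weight)
def row2numAltLoop : List Int → Int × Int → Int × Int
  | [], s => s
  | d :: rest, (t, w) => row2numAltLoop rest (t + d * w, w * 26)

-- validation pass first (Python raises 'Invalid character' there; outside Pre_row2num)
def row2num_alt (col : String) : Int :=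
  if col.toList.all PySem.Chars.isalpha then
    (row2numAltLoop (col.toList.map pvDigitOf).reverse (0, 1)).1
  else 0

-- ===== PRECONDITION & SPEC =====
-- Both A and B raise Exception("Invalid character: …") on any non-letter character;
-- Pre_ excludes exactly the strings containing one.
def Pre_row2num (col : String) : Prop := col.toList.all PySem.Chars.isalpha = true
instance (col : String) : Decidable (Pre_row2num col) := by unfold Pre_row2num; infer_instance
def pvWitness_row2num : String := "Az"

def Spec_row2num (col : String) (out : Int) : Prop := out = row2num_alt col
instance (col : String) (out : Int) : Decidable (Spec_row2num col out) := by unfold Spec_row2num; infer_instance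

-- ===== CLAIM (what is proved, stated in full; the proofs are below) =====
def Claim_equal_row2num : Prop :=
  ∀ (col : String), Dom_row2num col → Pre_row2num col → Spec_row2num col (row2num col)

-- ===== LEMMAS AND PROOFS =====

-- value of a digit list read least-significant-first
def pvHSum : List Int → Int
  | [] => 0
  | d :: rest => d + 26 * pvHSum rest

theorem pvHSum_append (ds : List Int) (d : Int) :
    pvHSum (ds ++ [d]) = pvHSum ds + d * 26 ^ ds.length := by
  induction ds with
  | nil => simp [pvHSum]
  | cons e ds ih => simp [pvHSum, ih, pow_succ]; ring

theorem row2numAltLoop_eq (ds : List Int) (t w : Int) :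
    row2numAltLoop ds (t, w) = (t + w * pvHSum ds, w * 26 ^ ds.length) := by
  induction ds generalizing t w with
  | nil => simp [row2numAltLoop, pvHSum]
  | cons d rest ih =>
      simp only [row2numAltLoop, ih, pvHSum, List.length_cons, pow_succ]
      rw [Prod.mk.injEq]
      constructor <;> ring

theorem index_alpha_aux (n : Nat) (h1 : 65 ≤ n) (h2 : n ≤ 90) :
    PySem.List.index? pvUpperAlphabet (Char.ofNat n) = some (n - 65) := by
  interval_cases n <;> decide

theorem charOfNat_toNat (n : Nat) (h : n < 55296) : (Char.ofNat n).toNat = n := by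
  have hv : Nat.isValidChar n := Or.inl h
  rw [Char.ofNat, dif_pos hv]
  rfl

theorem upperChar_bounds (c : Char) (h : PySem.Chars.isalpha c = true) :
    65 ≤ (PySem.Chars.upperChar c).toNat ∧ (PySem.Chars.upperChar c).toNat ≤ 90 := by
  have hval : (65 ≤ c.toNat ∧ c.toNat ≤ 90) ∨ (97 ≤ c.toNat ∧ c.toNat ≤ 122) := by
    simp only [PySem.Chars.isalpha, PySem.Chars.isupper, PySem.Chars.islower, Bool.or_eq_true,
      Bool.and_eq_true, decide_eq_true_eq] at h
    simp [Char.le_def, UInt32.le_iff_toNat_le] at h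
    exact h
  unfold PySem.Chars.upperChar
  by_cases hl : PySem.Chars.islower c = true
  · have hln : 97 ≤ c.toNat ∧ c.toNat ≤ 122 := by
      simp [PySem.Chars.islower, Char.le_def, UInt32.le_iff_toNat_le] at hl
      exact hl
    rw [if_pos hl, charOfNat_toNat _ (by omega)]
    omega
  · rw [if_neg hl]
    simp [PySem.Chars.islower, Char.le_def, UInt32.le_iff_toNat_le] at hl
    omega

-- digit as A computes it
def pvDigitA (c : Char) : Int := ((PySem.Chars.upperChar c).toNat : Int) - 65 + 1

theorem digitOf_eq_digitA (c : Char) (h : PySem.Chars.isalpha c = true) :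
    pvDigitOf c = pvDigitA c := by
  obtain ⟨h1, h2⟩ := upperChar_bounds c h
  unfold pvDigitOf pvDigitA
  have key : PySem.List.index? pvUpperAlphabet (PySem.Chars.upperChar c)
      = some ((PySem.Chars.upperChar c).toNat - 65) := by
    rw [← Char.ofNat_toNat (PySem.Chars.upperChar c)]
    rw [index_alpha_aux _ (by simpa using h1) (by simpa using h2)]
    simp
  rw [key]
  simp [Option.getD]
  omega

theorem row2numGo_eq (l : List Char) (acc : Int)
    (h : ∀ c ∈ l, PySem.Chars.isalpha c = true) :
    row2numGo l acc = acc * 26 ^ l.length + pvHSum (l.map pvDigitA).reverse := by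
  induction l generalizing acc with
  | nil => simp [row2numGo, pvHSum]
  | cons c l ih =>
      have hc : PySem.Chars.isalpha c = true := h c (List.mem_cons_self ..)
      simp only [row2numGo, hc, if_true, List.map_cons, List.reverse_cons, List.length_cons,
        pvHSum_append, List.length_reverse, List.length_map]
      rw [ih _ (fun x hx => h x (List.mem_cons_of_mem _ hx))]
      unfold pvDigitA
      simp [pow_succ]
      ring

-- ===== VERDICT (by name: the statement is the Claim_ definition above) =====
theorem row2num_spec : Claim_equal_row2num := by
  intro col _ hpre
  have hall : col.toList.all PySem.Chars.isalpha = true := hpre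
  have hmem : ∀ c ∈ col.toList, PySem.Chars.isalpha c = true := by
    simpa [List.all_eq_true] using hall
  unfold Spec_row2num row2num row2num_alt
  rw [if_pos hall, row2numGo_eq _ _ hmem]
  have hmap : col.toList.map pvDigitOf = col.toList.map pvDigitA :=
    List.map_congr_left (fun c hc => digitOf_eq_digitA c (hmem c hc))
  rw [hmap, row2numAltLoop_eq]
  simp
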